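-- pv_equiv track=rewrite | github.com/runajkhatiwada/MyProjects | KattisSolutions/Anagram.py | sum_of_duplicate_factorials
-- ===== SOURCE A (Python) =====
-- def sum_of_duplicate_factorials(input_str): #function to calulate the value of sub factorial for denominator [DuplicateCount1! * DuplicateCount1! * .... * DuplicateCountN!]
--     input_arr_asci = []
--
--     for i in range(len(input_str)):
--         input_arr_asci.append(ord(input_str[i]))
--
--     duplicate_count = [] #define the array to store the duplicate counts
--     sub_factorial = 1 #set the value as 1 by default
--     count = {}
--
--     for s in input_arr_asci: #run loop to find duplicate chars in the string
--       if s in count: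
--         count[s] += 1
--       else:
--         count[s] = 1
--
--     for key in count: #append the count of duplicate_count in new array
--       if count[key] > 1:
--         duplicate_count.append(count[key])
--
--     for i in range(len(duplicate_count)):
--         sub_factorial = sub_factorial * duplicate_count[i]
--
--     return sub_factorial
-- ===== SOURCE B (Python) =====
-- def sum_of_duplicate_factorials(input_str):
--     codes = sorted(ord(c) for c in input_str)
--
--     def run_product(xs):
--         if not xs:
--             return 1
--         c = xs[0]
--         k = 0
--         while k < len(xs) - 1 and xs[k + 1] == c:
--             k += 1
--         run = 1 + k
--         return (run if run > 1 else 1) * run_product(xs[run:])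
--
--     return run_product(codes)
-- ===== Notes on version B (the rewrite author's own statement) =====
-- stated objective: alternative
-- what changed: B replaces A's dict-of-frequencies (three sequential loops: build ord list, count into a dict, collect counts>1, multiply) by sorting the character codes once and multiplying run lengths >1 in a single recursive linear scan over the sorted list.
import Mathlib
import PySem

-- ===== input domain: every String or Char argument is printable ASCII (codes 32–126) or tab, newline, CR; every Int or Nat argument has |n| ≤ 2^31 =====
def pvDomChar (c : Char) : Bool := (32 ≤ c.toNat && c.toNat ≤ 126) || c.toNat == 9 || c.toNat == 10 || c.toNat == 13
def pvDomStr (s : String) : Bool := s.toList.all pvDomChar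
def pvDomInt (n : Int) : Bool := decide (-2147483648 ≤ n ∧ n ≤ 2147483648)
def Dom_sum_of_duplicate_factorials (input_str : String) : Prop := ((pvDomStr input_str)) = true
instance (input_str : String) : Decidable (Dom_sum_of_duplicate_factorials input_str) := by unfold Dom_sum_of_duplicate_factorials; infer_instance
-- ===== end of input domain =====

-- B replaces A's dict-of-frequencies pipeline (count into a dict, collect counts > 1, multiply)
-- by sorting the character codes once and multiplying run lengths > 1 in one recursive scan.


-- ===== PORT A =====
-- Loop 1: for i in range(len(input_str)): input_arr_asci.append(ord(input_str[i]))
--   (ord(input_str[i]) ported as pyGetD on the list of code points; i is always in range here, so pyGetD is exact);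
-- loop 2: the counting dict (if s in count: count[s] += 1 else: count[s] = 1);
-- loop 3: for key in count: append count[key] if > 1;  loop 4: the product over range(len(duplicate_count)).
def sum_of_duplicate_factorials (input_str : String) : Int :=
  let input_arr_asci : List Int :=
    (PySem.List.pyRange 0 (PySem.Str.len input_str) 1).foldl
      (fun acc i => acc ++ [PySem.List.pyGetD (input_str.toList.map (fun c => (c.toNat : Int))) i 0]) []
  let count : PySem.Dict Int Int :=
    input_arr_asci.foldl
      (fun d s => if d.contains s then d.insert s (d.getD s 0 + 1) else d.insert s 1)
      PySem.Dict.empty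
  let duplicate_count : List Int :=
    count.keys.foldl (fun acc key => if 1 < count.getD key 0 then acc ++ [count.getD key 0] else acc) []
  let sub_factorial : Int :=
    (PySem.List.pyRange 0 (PySem.List.len duplicate_count) 1).foldl
      (fun acc i => acc * PySem.List.pyGetD duplicate_count i 0) 1
  sub_factorial

-- ===== PORT B =====
-- run_product(xs): k = length of the prefix of xs[1:] equal to xs[0]; run = 1 + k;
-- multiply in run when run > 1 and recurse on xs[run:] (= xs[1:] with its first k elements dropped).
def pvRunProduct : List Int → Int
  | [] => 1
  | c :: t =>
    let k := (t.takeWhile (· == c)).length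
    let run := 1 + k
    (if 1 < run then (run : Int) else 1) * pvRunProduct (t.drop k)
termination_by xs => xs.length
decreasing_by
  simp only [List.length_cons]
  exact Nat.lt_succ_of_le (by simp [List.length_drop])

def sum_of_duplicate_factorials_alt (input_str : String) : Int :=
  let codes := PySem.List.sorted (input_str.toList.map (fun c => (c.toNat : Int))) (fun x => x) false
  pvRunProduct codes

-- ===== PRECONDITION & SPEC =====
def Spec_sum_of_duplicate_factorials (input_str : String) (out : Int) : Prop := out = sum_of_duplicate_factorials_alt input_str
instance (input_str : String) (out : Int) : Decidable (Spec_sum_of_duplicate_factorials input_str out) := by unfold Spec_sum_of_duplicate_factorials; infer_instance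

-- ===== CLAIM (what is proved, stated in full; the proofs are below) =====
def Claim_equal_sum_of_duplicate_factorials : Prop := ∀ (input_str : String), Dom_sum_of_duplicate_factorials input_str → Spec_sum_of_duplicate_factorials input_str (sum_of_duplicate_factorials input_str)

-- ===== LEMMAS AND PROOFS =====

-- The common value both programs compute: over the distinct codes of l, the product of the
-- multiplicities that exceed 1.
def pvProdDup (l : List Int) : Int :=
  ∏ k ∈ l.toFinset, (if 1 < l.count k then (l.count k : Int) else 1)

lemma pvProdDup_perm {l l' : List Int} (h : l.Perm l') : pvProdDup l = pvProdDup l' := by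
  unfold pvProdDup
  rw [List.toFinset_eq_of_perm _ _ h]
  exact Finset.prod_congr rfl (fun k _ => by rw [h.count_eq])

lemma drop_takeWhile_len (t : List Int) (p : Int → Bool) :
    t.drop (t.takeWhile p).length = t.dropWhile p := by
  induction t with
  | nil => rfl
  | cons a t ih =>
    by_cases h : p a
    · simp [h, ih]
    · simp [h]

-- B's run-length scan on a sorted list computes pvProdDup: the leading run of the head c has
-- length count c, and the rest of the list contains no c.
lemma runProduct_eq (s : List Int) (hs : s.Pairwise (· ≤ ·)) : pvRunProduct s = pvProdDup s := by
  induction s using pvRunProduct.induct with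
  | case1 => simp [pvRunProduct, pvProdDup]
  | case2 c t k ih =>
    rcases List.pairwise_cons.mp hs with ⟨hct, hpt⟩
    have hdrop : t.drop k = t.dropWhile (· == c) := drop_takeWhile_len t _
    have htk : ∀ x ∈ t.takeWhile (· == c), x = c :=
      fun x hx => eq_of_beq (List.mem_takeWhile_imp (p := (· == c)) hx)
    have hdr_pair : (t.dropWhile (· == c)).Pairwise (· ≤ ·) := hpt.sublist (List.dropWhile_sublist _)
    have hcdr : c ∉ t.dropWhile (· == c) := by
      intro hc
      cases hd : t.dropWhile (· == c) with
      | nil => rw [hd] at hc; simp at hc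
      | cons d ds =>
        have hdfalse : (d == c) = false := by
          have := List.head?_dropWhile_not (· == c) t
          rw [hd] at this; simpa using this
        have hdne : d ≠ c := by simpa using hdfalse
        have hdt : d ∈ t := (List.dropWhile_sublist (· == c)).mem (by rw [hd]; simp)
        have hcd : c ≤ d := hct d hdt
        rw [hd] at hc
        rcases List.mem_cons.mp hc with h | h
        · exact hdne h.symm
        · rw [hd] at hdr_pair
          exact hdne (le_antisymm ((List.pairwise_cons.mp hdr_pair).1 c h) hcd)
    have hsplit : t.takeWhile (· == c) ++ t.dropWhile (· == c) = t := List.takeWhile_append_dropWhile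
    have hcount_tk : (t.takeWhile (· == c)).count c = k :=
      le_antisymm (List.count_le_length) (by
        rw [List.count_eq_length.mpr (fun b hb => (htk b hb).symm)])
    have hcountc : (c :: t).count c = 1 + k := by
      rw [List.count_cons_self, ← hsplit, List.count_append, hcount_tk,
          List.count_eq_zero.mpr hcdr]
      omega
    have hcountne : ∀ x, x ≠ c → (c :: t).count x = (t.dropWhile (· == c)).count x := by
      intro x hx
      have h1 : List.count x (c :: t) = List.count x t := by
        simp [Ne.symm hx]
      have h2 : List.count x t
          = List.count x (t.takeWhile (· == c)) + List.count x (t.dropWhile (· == c)) := by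
        conv_lhs => rw [← hsplit]
        exact List.count_append
      rw [h1, h2, List.count_eq_zero.mpr (fun hmem => hx (htk x hmem))]
      omega
    have hfin : (c :: t).toFinset = insert c (t.dropWhile (· == c)).toFinset := by
      ext x
      simp only [List.mem_toFinset, List.mem_cons, Finset.mem_insert]
      constructor
      · rintro (h | h)
        · exact Or.inl h
        · rw [← hsplit] at h
          rcases List.mem_append.mp h with h | h
          · exact Or.inl (htk x h)
          · exact Or.inr (by simpa using h)
      · rintro (h | h)
        · exact Or.inl h
        · exact Or.inr (by rw [← hsplit]; exact List.mem_append.mpr (Or.inr (by simpa using h)))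
    have hrec : pvRunProduct (t.drop k) = pvProdDup (t.dropWhile (· == c)) := by
      rw [hdrop] at ih ⊢; exact ih hdr_pair
    rw [pvRunProduct]
    show (if 1 < 1 + k then ((1 + k : Nat) : Int) else 1) * pvRunProduct (t.drop k) = _
    rw [hrec]
    unfold pvProdDup
    rw [hfin, Finset.prod_insert (by simpa using hcdr), hcountc]
    congr 1
    refine Finset.prod_congr rfl (fun x hx => ?_)
    have hne : x ≠ c := by
      intro h; subst h; exact hcdr (List.mem_toFinset.mp hx)
    rw [hcountne x hne]

-- A's collect-and-multiply over the counter dict computes pvProdDup.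
lemma portA_eq (l : List Int) :
    (((PySem.Set.ofList l).filter (fun k => decide ((1:Int) < (l.count k : Int)))).map
        (fun k => ((l.count k : Int)))).foldl (fun a x => a * x) 1 = pvProdDup l := by
  have hnd : (PySem.Set.ofList l).Nodup := PySem.Set.nodup_ofList l
  have hd : ((PySem.Set.ofList l).filter (fun k => decide ((1:Int) < (l.count k : Int)))).Nodup :=
    hnd.filter _
  rw [← List.prod_eq_foldl, ← List.prod_toFinset _ hd, List.toFinset_filter]
  have hofl : (PySem.Set.ofList l : List Int).toFinset = l.toFinset := by
    ext x; simp [PySem.Set.mem_ofList]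
  rw [hofl]
  unfold pvProdDup
  rw [Finset.prod_filter]
  exact Finset.prod_congr rfl (fun x _ => by
    by_cases h : 1 < l.count x <;> simp [h])

-- A's first loop rebuilds the list of code points.
lemma loop1_eq (s : String) :
    (PySem.List.pyRange 0 (PySem.Str.len s) 1).foldl
      (fun acc i => acc ++ [PySem.List.pyGetD (s.toList.map (fun c => (c.toNat : Int))) i 0]) []
      = s.toList.map (fun c => (c.toNat : Int)) := by
  rw [PySem.List.foldl_append_singleton_eq_map]
  have hlen : PySem.Str.len s = PySem.List.len (s.toList.map (fun c => (c.toNat : Int))) := by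
    simp [pysem]
  rw [hlen]
  simpa using PySem.List.map_pyGetD_pyRange_zero (s.toList.map (fun c => (c.toNat : Int))) 0

-- A's branchy count loop builds Counter(input_arr_asci).
lemma loop2_eq (l : List Int) :
    l.foldl (fun d s => if d.contains s then d.insert s (d.getD s 0 + 1) else d.insert s 1)
      PySem.Dict.empty = PySem.Dict.counter l := by
  rw [← PySem.Dict.foldl_insert_getD_add_one_eq_counter]
  apply PySem.List.foldl_congr_mem
  intro d x _
  by_cases h : d.contains x
  · simp [h]
  · rw [if_neg h, PySem.Dict.getD_of_not_contains d 0 (by simpa using h)]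
    norm_num

-- ===== VERDICT (by name: the statement is the Claim_ definition above) =====
theorem sum_of_duplicate_factorials_spec : Claim_equal_sum_of_duplicate_factorials := by
  intro s _
  unfold Spec_sum_of_duplicate_factorials sum_of_duplicate_factorials sum_of_duplicate_factorials_alt
  simp only [loop1_eq s, loop2_eq, PySem.Dict.keys_counter, PySem.Dict.getD_counter]
  rw [PySem.List.foldl_append_ite (p := fun k => (1:Int) < ((s.toList.map (fun c => (c.toNat : Int))).count k : Int))
        (f := fun k => (((s.toList.map (fun c => (c.toNat : Int))).count k : Int)))]
  rw [PySem.List.foldl_pyRange_pyGetD _ 0 (fun a x => a * x) 1 le_rfl]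
  simp only [List.nil_append, Int.toNat_zero, List.drop_zero]
  rw [portA_eq]
  rw [runProduct_eq _ (by simpa using PySem.List.sorted_pairwise (s.toList.map (fun c => (c.toNat : Int))) (fun x => x))]
  exact (pvProdDup_perm (PySem.List.sorted_perm _ _ _)).symm
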